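-- pv_equiv track=rewrite | github.com/RakuLomis/traffic_encoder | .history/utils/dataframe_tools_20251110170604.py | generate_protocol_tree_and_nodes
-- ===== SOURCE A (Python) =====
-- from typing import Dict, List, Set, Tuple, Any
-- from collections import defaultdict
--
-- def generate_protocol_tree_and_nodes(columns: List[str]) -> (Dict[str, List[str]], Set[str]): # type: ignore
--     """
--     从列名中，自动发现所有真实节点和隐含的抽象节点。
--     """
--     tree = defaultdict(set)
--     all_nodes = set(columns)
--     for col in columns:
--         parts = col.split('.')
--         for i in range(1, len(parts)):
--             parent = ".".join(parts[:i])
--             child = ".".join(parts[:i+1])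
--             tree[parent].add(child)
--             all_nodes.add(parent)
--     tree_final = {parent: sorted(list(children)) for parent, children in tree.items()}
--     return tree_final, all_nodes
-- ===== SOURCE B (Python) =====
-- def generate_protocol_tree_and_nodes(columns):
--     # Pass 1: walk each column once, growing its dotted prefix chain; every
--     # prefix (including the full column) is a node of the tree.
--     chain = []
--     for col in columns:
--         acc = None
--         for part in col.split('.'):
--             acc = part if acc is None else acc + '.' + part
--             chain.append(acc)
--     all_nodes = set(columns)
--     all_nodes.update(chain)
--     # Pass 2: every dotted node names its own parent via rpartition; no
--     # (parent, child) edges are ever emitted while scanning the columns.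
--     tree = {}
--     for node in dict.fromkeys(chain):
--         head, sep, _ = node.rpartition('.')
--         if sep:
--             tree.setdefault(head, []).append(node)
--     return {p: sorted(cs) for p, cs in tree.items()}, all_nodes
-- ===== Notes on version B (the rewrite author's own statement) =====
-- stated objective: alternative
-- what changed: A emits a (parent, child) edge per column per depth from re-joined list slices into a defaultdict of sets; B never emits edges while scanning: pass 1 only collects the node set (each column's incremental prefix chain), and pass 2 derives each edge from the node itself via rpartition, grouping each dotted node under its own parent.
import Mathlib
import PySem

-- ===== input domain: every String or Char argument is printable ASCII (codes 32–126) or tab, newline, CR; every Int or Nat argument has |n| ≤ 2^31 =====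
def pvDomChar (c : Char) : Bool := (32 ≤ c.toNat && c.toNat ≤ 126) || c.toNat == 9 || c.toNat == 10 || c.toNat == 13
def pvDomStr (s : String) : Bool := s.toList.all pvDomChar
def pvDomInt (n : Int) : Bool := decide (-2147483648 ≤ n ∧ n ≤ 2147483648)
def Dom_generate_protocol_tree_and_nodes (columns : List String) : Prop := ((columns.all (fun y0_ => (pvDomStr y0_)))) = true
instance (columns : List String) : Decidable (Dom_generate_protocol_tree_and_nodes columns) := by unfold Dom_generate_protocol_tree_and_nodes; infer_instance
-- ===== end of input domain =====

-- B never emits (parent, child) edges while scanning the columns: it first collects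
-- the node set as incremental prefix chains, then derives each edge from the node
-- itself via rpartition (objective: alternative, node-centric decomposition).

-- ===== PORT A =====
def generate_protocol_tree_and_nodes (columns : List String) : (List (String × List String)) × List String :=
  let st := columns.foldl (fun st col =>
      -- col.split('.'); split? is `some` here since the separator "." is nonempty
      let parts := (PySem.Str.split? col ".").getD []
      (PySem.List.pyRange 1 (PySem.List.len parts) 1).foldl (fun st i =>
        let parent := PySem.Str.join "." (PySem.List.slice parts (some 0) (some i))
        let child := PySem.Str.join "." (PySem.List.slice parts (some 0) (some (i + 1)))
        (PySem.Dict.modify st.1 parent PySem.Set.empty (fun s => PySem.Set.add s child),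
         PySem.Set.add st.2 parent)) st)
    ((PySem.Dict.empty : PySem.Dict String (PySem.Set String)), PySem.Set.ofList columns)
  (st.1.items.map (fun p => (p.1, PySem.List.sorted p.2 (fun x => x) false)), st.2)

-- ===== PORT B =====
-- inner loop of Source B's pass 1: acc carries the growing dotted prefix
def pvChainGo : String → List String → List String
  | _, [] => []
  | acc, p :: ps => (acc ++ "." ++ p) :: pvChainGo (acc ++ "." ++ p) ps

def pvChain (col : String) : List String :=
  -- col.split('.') is never empty, so the [] branch is unreachable
  match (PySem.Str.split? col ".").getD [] with
  | [] => []
  | p :: ps => p :: pvChainGo p ps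

def generate_protocol_tree_and_nodes_alt (columns : List String) : (List (String × List String)) × List String :=
  let chain := columns.foldl (fun acc col => acc ++ pvChain col) []
  let allNodes := PySem.Set.update (PySem.Set.ofList columns) chain
  -- for node in dict.fromkeys(chain): head, sep, _ = node.rpartition('.'); if sep: …
  -- rpartition ported via rfind (exact): i = node.rfind('.'); sep nonempty iff i != -1; head = node[:i]
  let tree := (PySem.List.dedup chain).foldl (fun d node =>
      let i := PySem.Str.rfind node "."
      if i == -1 then d
      else PySem.Dict.modify d (PySem.Str.slice node none (some i)) [] (fun cs => cs ++ [node]))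
    (PySem.Dict.empty : PySem.Dict String (List String))
  (tree.items.map (fun p => (p.1, PySem.List.sorted p.2 (fun x => x) false)), allNodes)

-- ===== PRECONDITION & SPEC =====
def Spec_generate_protocol_tree_and_nodes (columns : List String) (out : (List (String × List String)) × List String) : Prop := out = generate_protocol_tree_and_nodes_alt columns
instance (columns : List String) (out : (List (String × List String)) × List String) : Decidable (Spec_generate_protocol_tree_and_nodes columns out) := by unfold Spec_generate_protocol_tree_and_nodes; infer_instance

-- ===== CLAIM (what is proved, stated in full; the proofs are below) =====
def Claim_equal_generate_protocol_tree_and_nodes : Prop := ∀ (columns : List String), Dom_generate_protocol_tree_and_nodes columns → Spec_generate_protocol_tree_and_nodes columns (generate_protocol_tree_and_nodes columns)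

-- ===== LEMMAS AND PROOFS =====

def pvSplitD : List Char → List (List Char)
  | [] => [[]]
  | c :: t => if c = '.' then [] :: pvSplitD t
              else match pvSplitD t with
                   | [] => [[c]]
                   | h :: r => (c :: h) :: r

theorem pvSplitD_ne_nil (l : List Char) : pvSplitD l ≠ [] := by
  cases l with
  | nil => simp [pvSplitD]
  | cons c t =>
      simp only [pvSplitD]
      split
      · simp
      · split <;> simp

def pvMapHd (f : List Char → List Char) : List (List Char) → List (List Char)
  | [] => []
  | h :: r => f h :: r

theorem pv_splitOn_go_eq (l : List Char) : ∀ (fuel : Nat), l.length < fuel → ∀ (cur : List Char) (acc : List (List Char)),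
    PySem.Chars.splitOn.go ['.'] fuel l cur acc = acc.reverse ++ pvMapHd (fun h => cur.reverse ++ h) (pvSplitD l) := by
  induction l with
  | nil =>
      intro fuel hf cur acc
      match fuel, hf with
      | fuel + 1, _ =>
        simp [PySem.Chars.splitOn.go, pvSplitD, pvMapHd]
  | cons c t ih =>
      intro fuel hf cur acc
      match fuel, hf with
      | fuel + 1, hf =>
        have ht : t.length < fuel := by simpa using Nat.lt_of_succ_lt_succ hf
        by_cases hc : c = '.'
        · subst hc
          have : (['.'].isPrefixOf ('.' :: t)) = true := by simp [List.isPrefixOf]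
          simp only [PySem.Chars.splitOn.go, this, if_true]
          rw [show (List.drop ['.'].length ('.' :: t)) = t from by simp]
          rw [ih fuel ht [] (cur.reverse :: acc)]
          simp [pvSplitD]
          cases h : pvSplitD t with
          | nil => exact absurd h (pvSplitD_ne_nil t)
          | cons h r => simp [pvMapHd]
        · have : (['.'].isPrefixOf (c :: t)) = false := by
            simp [List.isPrefixOf]
            exact fun hq => absurd hq.symm hc
          simp only [PySem.Chars.splitOn.go, this, Bool.false_eq_true, if_false]
          rw [ih fuel ht (c :: cur) acc]
          cases h : pvSplitD t with
          | nil => exact absurd h (pvSplitD_ne_nil t)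
          | cons h r =>
              simp [pvSplitD, hc, h, pvMapHd]

theorem pv_parts_eq (col : String) :
    (PySem.Str.split? col ".").getD [] = (pvSplitD col.toList).map String.ofList := by
  have h : PySem.Chars.splitOn col.toList ['.'] = pvSplitD col.toList := by
    unfold PySem.Chars.splitOn
    rw [pv_splitOn_go_eq col.toList (col.toList.length + 1) (by omega) [] []]
    cases h : pvSplitD col.toList with
    | nil => exact absurd h (pvSplitD_ne_nil _)
    | cons a r => simp [pvMapHd]
  simp [PySem.Str.split?, PySem.Chars.split?, show ".".toList = ['.'] from rfl, h]


theorem pvSplitD_dot (t : List Char) : pvSplitD ('.' :: t) = [] :: pvSplitD t := by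
  simp [pvSplitD]

theorem pvSplitD_cons (c : Char) (t : List Char) {a : List Char} {r : List (List Char)}
    (hc : c ≠ '.') (h : pvSplitD t = a :: r) : pvSplitD (c :: t) = (c :: a) :: r := by
  simp [pvSplitD, hc, h]

theorem pv_splitD_join (l : List Char) : PySem.Chars.join ['.'] (pvSplitD l) = l := by
  induction l with
  | nil => simp [pvSplitD, PySem.Chars.join_singleton]
  | cons c t ih =>
      by_cases hc : c = '.'
      · subst hc
        rw [pvSplitD_dot]
        cases h : pvSplitD t with
        | nil => exact absurd h (pvSplitD_ne_nil _)
        | cons a r =>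
            rw [PySem.Chars.join_cons_cons]
            rw [h] at ih
            simp [ih]
      · cases h : pvSplitD t with
        | nil => exact absurd h (pvSplitD_ne_nil _)
        | cons a r =>
            rw [pvSplitD_cons c t hc h]
            rw [h] at ih
            cases r with
            | nil =>
                simp [PySem.Chars.join_singleton] at ih ⊢
                simp [ih]
            | cons b r' =>
                rw [PySem.Chars.join_cons_cons] at ih
                rw [PySem.Chars.join_cons_cons]
                simp [← ih]

theorem pv_splitD_nodot (l : List Char) : ∀ x ∈ pvSplitD l, '.' ∉ x := by
  induction l with
  | nil => simp [pvSplitD]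
  | cons c t ih =>
      by_cases hc : c = '.'
      · subst hc
        rw [pvSplitD_dot]
        intro x hx
        rcases List.mem_cons.mp hx with h | h
        · simp [h]
        · exact ih x h
      · cases h : pvSplitD t with
        | nil => exact absurd h (pvSplitD_ne_nil _)
        | cons a r =>
            rw [pvSplitD_cons c t hc h]
            intro x hx
            rcases List.mem_cons.mp hx with h' | h'
            · subst h'
              intro hmem
              rcases List.mem_cons.mp hmem with h'' | h''
              · exact hc h''.symm
              · exact ih a (by simp [h]) h''
            · exact ih x (by simp [h, h'])

theorem pv_join_singleton (p : String) : PySem.Str.join "." [p] = p := by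
  simp [PySem.Str.join, PySem.Chars.join_singleton, String.ofList_toList]

theorem pv_join_glue (p q : String) (l : List String) :
    PySem.Str.join "." (p :: q :: l) = PySem.Str.join "." ((p ++ "." ++ q) :: l) := by
  cases l with
  | nil =>
      simp [PySem.Str.join, PySem.Chars.join_singleton, PySem.Chars.join_cons_cons,
        String.toList_append]
  | cons x xs =>
      simp [PySem.Str.join, PySem.Chars.join_cons_cons, String.toList_append]

def pvLastAcc (p : String) (ps : List String) : String := ps.foldl (fun a q => a ++ "." ++ q) p

theorem pvLastAcc_eq_join (ps : List String) (p : String) :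
    pvLastAcc p ps = PySem.Str.join "." (p :: ps) := by
  induction ps generalizing p with
  | nil => simp [pvLastAcc, pv_join_singleton]
  | cons q qs ih =>
      rw [pv_join_glue]
      rw [← ih (p ++ "." ++ q)]
      rfl

theorem pv_split_join (col : String) :
    PySem.Str.join "." ((PySem.Str.split? col ".").getD []) = col := by
  rw [pv_parts_eq]
  simp only [PySem.Str.join, List.map_map]
  have : (pvSplitD col.toList).map (String.toList ∘ String.ofList) = pvSplitD col.toList := by
    simp [Function.comp_def, String.toList_ofList]
  rw [this, show ".".toList = ['.'] from rfl, pv_splitD_join, String.ofList_toList]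

theorem pv_prefix_dot_false (x : List Char) (hx : '.' ∉ x) : ['.'].isPrefixOf x = false := by
  cases x with
  | nil => rfl
  | cons c cs =>
      have : c ≠ '.' := fun h => hx (by simp [h])
      simp [List.isPrefixOf]
      exact fun h => absurd h.symm this

theorem pv_rfind_go_base (A B : List Char) :
    PySem.Chars.rfind.go (A ++ '.' :: B) ['.'] A.length = (A.length : Int) := by
  cases hA : A.length with
  | zero =>
      have : A = [] := List.length_eq_zero_iff.mp hA
      subst this
      simp [PySem.Chars.rfind.go, List.isPrefixOf]
  | succ j =>
      have hdrop : List.drop (j + 1) (A ++ '.' :: B) = '.' :: B := by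
        rw [List.drop_append, ← hA]
        simp
      simp [PySem.Chars.rfind.go, hdrop, List.isPrefixOf]

theorem pv_rfind_go_above (A B : List Char) (hB : '.' ∉ B) :
    ∀ k, k ≤ B.length + 1 → PySem.Chars.rfind.go (A ++ '.' :: B) ['.'] (A.length + k) = (A.length : Int) := by
  intro k
  induction k with
  | zero => intro _; simpa using pv_rfind_go_base A B
  | succ k ih =>
      intro hk
      have hdrop : List.drop (A.length + k + 1) (A ++ '.' :: B) = List.drop k B := by
        rw [List.drop_append, List.drop_eq_nil_of_le (by omega), List.nil_append,
          show A.length + k + 1 - A.length = k + 1 by omega, List.drop_succ_cons]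
      have hpf : ['.'].isPrefixOf (List.drop (A.length + k + 1) (A ++ '.' :: B)) = false := by
        rw [hdrop]
        apply pv_prefix_dot_false
        intro hmem
        exact hB (List.mem_of_mem_drop hmem)
      have : A.length + (k + 1) = (A.length + k) + 1 := by omega
      rw [this]
      simp only [PySem.Chars.rfind.go, hpf, Bool.false_eq_true, if_false]
      exact ih (by omega)

theorem pv_rfind_append (a b : String) (hb : '.' ∉ b.toList) :
    PySem.Str.rfind (a ++ "." ++ b) "." = (a.toList.length : Int) := by
  have htl : (a ++ "." ++ b).toList = a.toList ++ '.' :: b.toList := by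
    simp [String.toList_append]
  simp only [PySem.Str.rfind, htl, show ".".toList = ['.'] from rfl]
  unfold PySem.Chars.rfind
  have hlen : (a.toList ++ '.' :: b.toList).length = a.toList.length + (b.toList.length + 1) := by
    simp
  rw [hlen]
  exact pv_rfind_go_above a.toList b.toList hb (b.toList.length + 1) (le_refl _)

theorem pv_rfind_go_nodot (p : List Char) (hp : '.' ∉ p) :
    ∀ k, PySem.Chars.rfind.go p ['.'] k = -1 := by
  intro k
  induction k with
  | zero =>
      simp [PySem.Chars.rfind.go, pv_prefix_dot_false p hp]
  | succ k ih =>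
      have hpf : ['.'].isPrefixOf (List.drop (k + 1) p) = false := by
        apply pv_prefix_dot_false
        intro hmem
        exact hp (List.mem_of_mem_drop hmem)
      simp only [PySem.Chars.rfind.go, hpf, Bool.false_eq_true, if_false]
      exact ih

theorem pv_rfind_nodot (p : String) (hp : '.' ∉ p.toList) :
    PySem.Str.rfind p "." = -1 := by
  simp only [PySem.Str.rfind, show ".".toList = ['.'] from rfl]
  unfold PySem.Chars.rfind
  exact pv_rfind_go_nodot p.toList hp _

theorem pv_slice_append (a b : String) :
    PySem.Str.slice (a ++ "." ++ b) none (some ((a.toList.length : Nat) : Int)) = a := by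
  have htl : (a ++ "." ++ b).toList = a.toList ++ '.' :: b.toList := by
    simp [String.toList_append]
  simp only [PySem.Str.slice, htl, PySem.Chars.slice_eq_listSlice, PySem.List.slice_to_natCast]
  rw [List.take_left, String.ofList_toList]

def pvEdgesGo : String → List String → List (String × String)
  | _, [] => []
  | prev, p :: ps => (prev, prev ++ "." ++ p) :: pvEdgesGo (prev ++ "." ++ p) ps

def pvEdges (col : String) : List (String × String) :=
  match (PySem.Str.split? col ".").getD [] with
  | [] => []
  | p :: ps => pvEdgesGo p ps

theorem pvChainGo_eq (ps : List String) (p : String) :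
    pvChainGo p ps = (pvEdgesGo p ps).map Prod.snd := by
  induction ps generalizing p with
  | nil => rfl
  | cons q qs ih => simp [pvChainGo, pvEdgesGo, ih]

theorem pv_edgesGo_struct (ps : List String) (p : String) (h : ∀ q ∈ ps, '.' ∉ q.toList) :
    ∀ e ∈ pvEdgesGo p ps, ∃ b, e.2 = e.1 ++ "." ++ b ∧ '.' ∉ b.toList := by
  induction ps generalizing p with
  | nil => simp [pvEdgesGo]
  | cons q qs ih =>
      intro e he
      rcases List.mem_cons.mp he with h' | h'
      · subst h'
        exact ⟨q, rfl, h q (by simp)⟩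
      · exact ih (p ++ "." ++ q) (fun r hr => h r (by simp [hr])) e h'

theorem pv_edges_struct (col : String) :
    ∀ e ∈ pvEdges col, ∃ b, e.2 = e.1 ++ "." ++ b ∧ '.' ∉ b.toList := by
  unfold pvEdges
  rw [pv_parts_eq]
  cases h : pvSplitD col.toList with
  | nil => exact absurd h (pvSplitD_ne_nil _)
  | cons a r =>
      simp only [List.map_cons]
      apply pv_edgesGo_struct
      intro q hq
      rcases List.mem_map.mp hq with ⟨x, hx, rfl⟩
      rw [String.toList_ofList]
      exact pv_splitD_nodot col.toList x (by simp [h, hx])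

theorem pv_head_of_edge (col : String) :
    ∀ e ∈ pvEdges col,
      (PySem.Str.rfind e.2 "." == (-1 : Int)) = false ∧
      PySem.Str.slice e.2 none (some (PySem.Str.rfind e.2 ".")) = e.1 := by
  intro e he
  rcases pv_edges_struct col e he with ⟨b, h2, hb⟩
  rw [h2, pv_rfind_append e.1 b hb]
  constructor
  · simp
  · exact pv_slice_append e.1 b

-- roots of a chain carry no dot
theorem pv_chain_root_nodot (col : String) :
    ∀ p ps, (PySem.Str.split? col ".").getD [] = p :: ps → PySem.Str.rfind p "." = -1 := by
  intro p ps h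
  rw [pv_parts_eq] at h
  cases hs : pvSplitD col.toList with
  | nil => exact absurd hs (pvSplitD_ne_nil _)
  | cons a r =>
      rw [hs] at h
      simp only [List.map_cons, List.cons.injEq] at h
      apply pv_rfind_nodot
      rw [← h.1, String.toList_ofList]
      exact pv_splitD_nodot col.toList a (by simp [hs])

theorem pv_filter_chain (columns : List String) :
    (columns.flatMap pvChain).filter (fun n => !(PySem.Str.rfind n "." == (-1 : Int)))
      = (columns.flatMap pvEdges).map Prod.snd := by
  rw [List.map_flatMap]
  induction columns with
  | nil => rfl
  | cons col cols ih =>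
      rw [List.flatMap_cons, List.flatMap_cons, List.filter_append, ih]
      congr 1
      unfold pvChain pvEdges
      cases h : (PySem.Str.split? col ".").getD [] with
      | nil => rfl
      | cons p ps =>
          simp only
          rw [pvChainGo_eq]
          rw [List.filter_cons_of_neg (by
            rw [pv_chain_root_nodot col p ps h]; decide)]
          apply List.filter_eq_self.mpr
          intro n hn
          rcases List.mem_map.mp hn with ⟨e, he, rfl⟩
          have h1 := (pv_head_of_edge col e (by rw [pvEdges, h]; exact he)).1
          rw [h1]; rfl

theorem pv_filter_ofList {α : Type} [BEq α] [LawfulBEq α] (q : α → Bool) (l : List α) :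
    (PySem.Set.ofList l).filter q = PySem.Set.ofList (l.filter q) := by
  induction l using List.reverseRecOn with
  | nil => rfl
  | append_singleton l x ih =>
      rw [List.filter_append, PySem.Set.ofList_append_singleton]
      by_cases hq : q x = true
      · rw [show List.filter q [x] = [x] by simp [hq], PySem.Set.ofList_append_singleton, ← ih]
        by_cases hx : x ∈ PySem.Set.ofList l
        · rw [PySem.Set.add_of_mem hx, PySem.Set.add_of_mem (by
            exact List.mem_filter.mpr ⟨hx, hq⟩)]
        · rw [PySem.Set.add_of_not_mem hx, PySem.Set.add_of_not_mem (by
            intro hmem; exact hx (List.mem_filter.mp hmem).1)]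
          rw [List.filter_append, List.filter_cons_of_pos hq]
          simp
      · rw [show List.filter q [x] = [] by simp [hq], List.append_nil, ← ih]
        by_cases hx : x ∈ PySem.Set.ofList l
        · rw [PySem.Set.add_of_mem hx]
        · rw [PySem.Set.add_of_not_mem hx, List.filter_append]
          simp [hq]

theorem pv_ofList_map_ofList {α β : Type} [BEq α] [LawfulBEq α] [BEq β] [LawfulBEq β]
    (f : α → β) (l : List α) :
    PySem.Set.ofList ((PySem.Set.ofList l).map f) = PySem.Set.ofList (l.map f) := by
  induction l using List.reverseRecOn with
  | nil => rfl
  | append_singleton l x ih =>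
      rw [PySem.Set.ofList_append_singleton, List.map_append,
        show List.map f [x] = [f x] from rfl, PySem.Set.ofList_append_singleton]
      by_cases hx : x ∈ PySem.Set.ofList l
      · have hfx : f x ∈ PySem.Set.ofList (l.map f) := by
          rw [PySem.Set.mem_ofList]
          exact List.mem_map_of_mem ((PySem.Set.mem_ofList _ _).mp hx)
        rw [PySem.Set.add_of_mem hx, ih, PySem.Set.add_of_mem hfx]
      · rw [PySem.Set.add_of_not_mem hx, List.map_append,
          show List.map f [x] = [f x] from rfl, PySem.Set.ofList_append_singleton, ih]

theorem pv_items_group (L : List (String × String)) :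
    (L.foldl (fun d p => PySem.Dict.modify d p.1 [] (fun x => x ++ [p.2])) PySem.Dict.empty).items
      = (PySem.Set.ofList (L.map Prod.fst)).map
          (fun k => (k, (L.filter (fun p => p.1 == k)).map (fun p => p.2))) := by
  have hnd : (L.foldl (fun d p => PySem.Dict.modify d p.1 [] (fun x => x ++ [p.2])) PySem.Dict.empty).keys.Nodup := by
    exact PySem.Dict.nodup_keys_foldl_modify_key L Prod.fst [] (fun _ p => fun x => x ++ [p.2]) _ PySem.Dict.nodup_keys_empty
  rw [PySem.Dict.items_eq_map_keys _ hnd []]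
  rw [PySem.Dict.keys_foldl_modify_key L Prod.fst [] (fun _ p => fun x => x ++ [p.2])]
  rw [show (PySem.Dict.empty : PySem.Dict String (List String)).keys = [] from rfl]
  rw [PySem.Set.update_nil_left]
  apply List.map_congr_left
  intro k _
  rw [PySem.Dict.getD_foldl_modify_append L PySem.Dict.empty k]
  rw [PySem.Dict.getD_empty, List.nil_append]

theorem pv_update_chainGo (ps : List String) : ∀ (p : String) (s : PySem.Set String),
    pvLastAcc p ps ∈ s →
    PySem.Set.update s (p :: (pvEdgesGo p ps).map Prod.snd)
      = PySem.Set.update s ((pvEdgesGo p ps).map Prod.fst) := by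
  induction ps with
  | nil =>
      intro p s h
      simp only [pvEdgesGo, List.map_nil, PySem.Set.update_cons, PySem.Set.update_nil]
      exact PySem.Set.add_of_mem h
  | cons q qs ih =>
      intro p s h
      simp only [pvEdgesGo, List.map_cons, PySem.Set.update_cons]
      exact ih (p ++ "." ++ q) (s.add p)
        ((PySem.Set.mem_add s p _).mpr (Or.inl h))

theorem pv_update_chain (columns : List String) :
    ∀ s : PySem.Set String, (∀ c ∈ columns, c ∈ s) →
      PySem.Set.update s (columns.flatMap pvChain)
        = PySem.Set.update s ((columns.flatMap pvEdges).map Prod.fst) := by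
  induction columns with
  | nil => intro s _; rfl
  | cons col cols ih =>
      intro s hs
      rw [List.flatMap_cons, List.flatMap_cons, List.map_append,
        PySem.Set.update_append, PySem.Set.update_append]
      have hcol : PySem.Set.update s (pvChain col) = PySem.Set.update s ((pvEdges col).map Prod.fst) := by
        unfold pvChain pvEdges
        cases h : (PySem.Str.split? col ".").getD [] with
        | nil => rfl
        | cons p ps =>
            simp only
            rw [pvChainGo_eq]
            apply pv_update_chainGo
            have : pvLastAcc p ps = col := by
              rw [pvLastAcc_eq_join, ← h, pv_split_join]
            rw [this]
            exact hs col (by simp)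
      rw [hcol]
      apply ih
      intro c hc
      rw [PySem.Set.mem_update]
      exact Or.inl (hs c (by simp [hc]))

theorem pvEdgesGo_eq_map (ps : List String) (p : String) :
    pvEdgesGo p ps = (List.range ps.length).map
      (fun k => (PySem.Str.join "." (p :: ps.take k), PySem.Str.join "." (p :: ps.take (k + 1)))) := by
  induction ps generalizing p with
  | nil => rfl
  | cons q qs ih =>
      simp only [pvEdgesGo, List.length_cons, List.range_succ_eq_map, List.map_cons,
        List.map_map]
      congr 1
      · simp [pv_join_singleton, pv_join_glue]
      · rw [ih (p ++ "." ++ q)]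
        apply List.map_congr_left
        intro k _
        simp only [Function.comp_apply, Nat.succ_eq_add_one, List.take_succ_cons,
          pv_join_glue]

theorem pv_inner_eq (col : String)
    (st : PySem.Dict String (PySem.Set String) × PySem.Set String) :
    (let parts := (PySem.Str.split? col ".").getD []
     (PySem.List.pyRange 1 (PySem.List.len parts) 1).foldl (fun st i =>
        let parent := PySem.Str.join "." (PySem.List.slice parts (some 0) (some i))
        let child := PySem.Str.join "." (PySem.List.slice parts (some 0) (some (i + 1)))
        (PySem.Dict.modify st.1 parent PySem.Set.empty (fun s => PySem.Set.add s child),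
         PySem.Set.add st.2 parent)) st)
    = (pvEdges col).foldl (fun st e =>
        (PySem.Dict.modify st.1 e.1 PySem.Set.empty (fun s => PySem.Set.add s e.2),
         PySem.Set.add st.2 e.1)) st := by
  unfold pvEdges
  cases h : (PySem.Str.split? col ".").getD [] with
  | nil =>
      simp [PySem.List.len, PySem.List.pyRange_one_eq_nil]
  | cons p ps =>
      simp only [PySem.List.len_eq, List.length_cons]
      rw [pvEdgesGo_eq_map, List.foldl_map]
      rw [PySem.List.pyRange_one, List.foldl_map]
      have hlen : (((ps.length + 1 : Nat) : Int) - 1).toNat = ps.length := by omega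
      rw [hlen]
      apply PySem.List.foldl_congr_mem
      intro st' k _
      have e1 : PySem.List.slice (p :: ps) (some 0) (some (1 + (k : Int))) = p :: ps.take k := by
        rw [PySem.List.slice_zero_start,
          show (1 : Int) + (k : Int) = ((k + 1 : Nat) : Int) by push_cast; ring,
          PySem.List.slice_to_natCast, List.take_succ_cons]
      have e2 : PySem.List.slice (p :: ps) (some 0) (some (1 + (k : Int) + 1)) = p :: ps.take (k + 1) := by
        rw [PySem.List.slice_zero_start,
          show (1 : Int) + (k : Int) + 1 = ((k + 2 : Nat) : Int) by push_cast; ring,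
          PySem.List.slice_to_natCast, List.take_succ_cons]
      rw [e1, e2]

def pvMapVals (d : PySem.Dict String (List String)) : PySem.Dict String (PySem.Set String) :=
  ⟨d.items.map (fun p => (p.1, PySem.Set.ofList p.2))⟩

theorem pv_items_mapVals (d : PySem.Dict String (List String)) :
    (pvMapVals d).items = d.items.map (fun p => (p.1, PySem.Set.ofList p.2)) := rfl

theorem pv_contains_mapVals (d : PySem.Dict String (List String)) (k : String) :
    (pvMapVals d).contains k = d.contains k := by
  simp only [pvMapVals, PySem.Dict.contains, List.any_map]
  rfl

theorem pv_getD_mapVals (d : PySem.Dict String (List String)) (k : String) :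
    (pvMapVals d).getD k PySem.Set.empty = PySem.Set.ofList (d.getD k []) := by
  simp only [PySem.Dict.getD, PySem.Dict.get?, pvMapVals, List.find?_map, Function.comp_def]
  cases List.find? (fun p => p.1 == k) d.items with
  | none => rfl
  | some p => rfl

theorem pv_modify_mapVals (d : PySem.Dict String (List String)) (k v : String) :
    PySem.Dict.modify (pvMapVals d) k PySem.Set.empty (fun s => PySem.Set.add s v)
      = pvMapVals (PySem.Dict.modify d k [] (fun cs => cs ++ [v])) := by
  simp only [PySem.Dict.modify, pv_getD_mapVals, ← PySem.Set.ofList_append_singleton]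
  simp only [PySem.Dict.insert, pv_contains_mapVals]
  split
  · apply congrArg PySem.Dict.mk
    simp only [pvMapVals, List.map_map]
    apply List.map_congr_left
    intro p _
    by_cases hp : p.1 = k
    · simp [hp]
    · simp [hp]
  · apply congrArg PySem.Dict.mk
    simp [pvMapVals]

theorem pv_foldl_mapVals (E : List (String × String)) (d : PySem.Dict String (List String)) :
    E.foldl (fun d e => PySem.Dict.modify d e.1 PySem.Set.empty (fun s => PySem.Set.add s e.2))
      (pvMapVals d)
    = pvMapVals (E.foldl (fun d e => PySem.Dict.modify d e.1 [] (fun cs => cs ++ [e.2])) d) := by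
  induction E generalizing d with
  | nil => rfl
  | cons e E ih =>
      simp only [List.foldl_cons, pv_modify_mapVals]
      exact ih _

def pvHd (n : String) : String := PySem.Str.slice n none (some (PySem.Str.rfind n "."))

theorem pv_head_of_edge_flat (columns : List String) :
    ∀ e ∈ columns.flatMap pvEdges, pvHd e.2 = e.1 := by
  intro e he
  rcases List.mem_flatMap.mp he with ⟨col, _, hcol⟩
  exact (pv_head_of_edge col e hcol).2

theorem pv_tree_eq (columns : List String) :
    ((columns.flatMap pvEdges).foldl
        (fun d e => PySem.Dict.modify d e.1 PySem.Set.empty (fun s => PySem.Set.add s e.2))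
        PySem.Dict.empty).items.map (fun p => (p.1, PySem.List.sorted p.2 (fun x => x) false))
      = ((PySem.List.dedup (columns.flatMap pvChain)).foldl (fun d node =>
          let i := PySem.Str.rfind node "."
          if i == -1 then d
          else PySem.Dict.modify d (PySem.Str.slice node none (some i)) [] (fun cs => cs ++ [node]))
          PySem.Dict.empty).items.map (fun p => (p.1, PySem.List.sorted p.2 (fun x => x) false)) := by
  -- B side: the guarded fold over deduped chain nodes
  have hb : ∀ (d : PySem.Dict String (List String)) (node : String),
      (fun d node =>
        let i := PySem.Str.rfind node "."
        if i == -1 then d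
        else PySem.Dict.modify d (PySem.Str.slice node none (some i)) [] (fun cs => cs ++ [node])) d node
      = (fun d node => if (!(PySem.Str.rfind node "." == (-1 : Int))) = true
          then PySem.Dict.modify d (pvHd node) [] (fun cs => cs ++ [node]) else d) d node := by
    intro d node
    show (if PySem.Str.rfind node "." == (-1 : Int) then d
        else PySem.Dict.modify d (PySem.Str.slice node none (some (PySem.Str.rfind node "."))) [] (fun cs => cs ++ [node])) = _
    cases hbb : PySem.Str.rfind node "." == (-1 : Int) <;>
      simp only [hbb, Bool.not_true, Bool.not_false, if_true, if_false, pvHd,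
        Bool.false_eq_true]
  rw [PySem.List.dedup_eq_ofList,
    funext (fun d => funext (fun node => hb d node)),
    PySem.List.foldl_if_eq_foldl_filter (p := fun node => !(PySem.Str.rfind node "." == (-1 : Int)))
      (f := fun d node => PySem.Dict.modify d (pvHd node) [] (fun cs => cs ++ [node])),
    pv_filter_ofList, pv_filter_chain,
    ← List.foldl_map (f := fun n => (pvHd n, n))
      (g := fun d (p : String × String) => PySem.Dict.modify d p.1 [] (fun cs => cs ++ [p.2])),
    pv_items_group, List.map_map]
  -- A side: dict of sets = set-image of the grouping dict
  rw [show (PySem.Dict.empty : PySem.Dict String (PySem.Set String)) = pvMapVals PySem.Dict.empty from rfl,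
    pv_foldl_mapVals, pv_items_mapVals, List.map_map, pv_items_group, List.map_map]
  -- keys coincide
  have hkeys : PySem.Set.ofList (((PySem.Set.ofList ((columns.flatMap pvEdges).map Prod.snd)).map
        (fun n => (pvHd n, n))).map Prod.fst)
      = PySem.Set.ofList ((columns.flatMap pvEdges).map Prod.fst) := by
    rw [List.map_map]
    rw [show (Prod.fst ∘ fun n => (pvHd n, n)) = pvHd from rfl]
    rw [pv_ofList_map_ofList, List.map_map]
    congr 1
    apply List.map_congr_left
    intro e he
    exact pv_head_of_edge_flat columns e he
  rw [hkeys]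
  apply List.map_congr_left
  intro k _
  simp only [Function.comp_apply]
  congr 1
  -- values coincide
  rw [List.filter_map, List.map_map]
  rw [show (Prod.snd ∘ fun n => (pvHd n, n)) = id from rfl, List.map_id]
  rw [show ((fun (p : String × String) => p.1 == k) ∘ fun n => (pvHd n, n)) = (fun n => pvHd n == k) from rfl]
  rw [pv_filter_ofList, List.filter_map]
  have hflt : List.filter ((fun n => pvHd n == k) ∘ Prod.snd) (columns.flatMap pvEdges)
      = List.filter (fun (p : String × String) => p.1 == k) (columns.flatMap pvEdges) := by
    apply List.filter_congr
    intro e he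
    rw [Function.comp_apply, pv_head_of_edge_flat columns e he]
  rw [hflt]

-- ===== VERDICT (by name: the statement is the Claim_ definition above) =====
theorem generate_protocol_tree_and_nodes_spec : Claim_equal_generate_protocol_tree_and_nodes := by
  intro columns _
  unfold Spec_generate_protocol_tree_and_nodes
  unfold generate_protocol_tree_and_nodes generate_protocol_tree_and_nodes_alt
  simp only [pv_inner_eq]
  rw [← List.foldl_flatMap]
  rw [PySem.List.foldl_append_eq_flatMap, List.nil_append]
  rw [PySem.List.foldl_prod_mk
      (f := fun d (e : String × String) =>
        PySem.Dict.modify d e.1 PySem.Set.empty (fun s => PySem.Set.add s e.2))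
      (g := fun s (e : String × String) => PySem.Set.add s e.1)]
  have hset : (columns.flatMap pvEdges).foldl (fun s e => PySem.Set.add s e.1)
        (PySem.Set.ofList columns)
      = PySem.Set.update (PySem.Set.ofList columns) (columns.flatMap pvChain) := by
    rw [← PySem.Set.update_map_eq_foldl_add]
    rw [pv_update_chain columns (PySem.Set.ofList columns)
      (fun c hc => (PySem.Set.mem_ofList _ _).mpr hc)]
  rw [hset, pv_tree_eq columns]
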